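-- pv_equiv track=rewrite | github.com/Julien-pour/arc_example | others_examples/7b-solved_14b-failed_gen4/05269061/task.py | transform
-- ===== SOURCE A (Python) =====
-- def transform(grid):
--     rows, cols = (len(grid), len(grid[0]))
--     for i in range(rows):
--         for j in range(cols):
--             if grid[i][j] != 0:
--                 for k in range(rows):
--                     for l in range(cols):
--                         if (k - i + l - j) % 3 == 0:
--                             grid[k][l] = grid[i][j]
--     return grid
-- ===== SOURCE B (Python) =====
-- # Single scan per residue class: record first nonzero value of each (i+j)%3 class,
-- # then fill every class cell once (mutates grid in place, like A).
-- def transform(grid):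
--     rows, cols = len(grid), len(grid[0])
--     vals = [None, None, None]
--     for i in range(rows):
--         for j in range(cols):
--             c = (i + j) % 3
--             if vals[c] is None and grid[i][j] != 0:
--                 vals[c] = grid[i][j]
--     for i in range(rows):
--         for j in range(cols):
--             v = vals[(i + j) % 3]
--             if v is not None:
--                 grid[i][j] = v
--     return grid
-- ===== Notes on version B (the rewrite author's own statement) =====
-- stated objective: faster
-- what changed: A lets every nonzero cell (including freshly painted ones) repaint its entire (i+j)%3 diagonal class over the whole grid; B scans the grid once recording the first nonzero value of each of the 3 residue classes, then fills each class in one pass.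
import Mathlib
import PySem

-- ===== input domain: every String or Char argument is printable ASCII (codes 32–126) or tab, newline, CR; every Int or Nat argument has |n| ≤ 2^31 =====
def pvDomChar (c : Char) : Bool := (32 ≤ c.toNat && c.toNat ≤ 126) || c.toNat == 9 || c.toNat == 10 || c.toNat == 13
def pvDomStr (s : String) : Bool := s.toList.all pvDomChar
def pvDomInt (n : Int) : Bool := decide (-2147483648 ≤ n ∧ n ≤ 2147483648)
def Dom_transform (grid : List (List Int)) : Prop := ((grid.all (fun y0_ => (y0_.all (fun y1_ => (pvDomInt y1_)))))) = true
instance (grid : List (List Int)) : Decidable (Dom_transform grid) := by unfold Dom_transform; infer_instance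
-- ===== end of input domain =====

-- B replaces A's repeated repainting (every nonzero cell — including freshly painted ones —
-- repaints its whole (i+j)%3 diagonal class) by one scan that records the first nonzero value
-- of each of the 3 classes, plus one fill pass. Both A and B mutate `grid` in place in Python
-- (the same cells are written); the equivalence proved here is about the returned value.

-- ===== PORT A =====
-- grid[i][j] reads and grid[k][l] writes are in range on Pre_ (every row at least as long as
-- row 0), so List.getD / List.modify / List.set are exact there; grid[0] on [] raises
-- IndexError, excluded by Pre_ and ported as headD.
def transform (grid : List (List Int)) : List (List Int) :=
  let rows := grid.length
  let cols := (grid.headD []).length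
  (List.range rows).foldl (fun g i =>
    (List.range cols).foldl (fun g j =>
      let v := (g.getD i []).getD j 0
      if v ≠ 0 then
        (List.range rows).foldl (fun g (k : Nat) =>
          (List.range cols).foldl (fun g (l : Nat) =>
            if ((k : Int) - (i : Int) + (l : Int) - (j : Int)) % 3 = 0 then
              g.modify k (fun row => row.set l v)
            else g) g) g
      else g) g) grid

-- ===== PORT B =====
def transform_alt (grid : List (List Int)) : List (List Int) :=
  let rows := grid.length
  let cols := (grid.headD []).length
  let vals : List (Option Int) :=
    (List.range rows).foldl (fun vals i =>
      (List.range cols).foldl (fun vals j =>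
        if vals.getD ((i + j) % 3) none = none ∧ (grid.getD i []).getD j 0 ≠ 0 then
          vals.set ((i + j) % 3) (some ((grid.getD i []).getD j 0))
        else vals) vals) [none, none, none]
  (List.range rows).foldl (fun g i =>
    (List.range cols).foldl (fun g j =>
      match vals.getD ((i + j) % 3) none with
      | some v => g.modify i (fun row => row.set j v)
      | none => g) g) grid

-- ===== PRECONDITION & SPEC =====
-- Pre_ excludes the empty grid (grid[0] in A raises IndexError) and grids with a row shorter
-- than row 0, on which A's painting loop can raise IndexError and B's scan raises IndexError.
def Pre_transform (grid : List (List Int)) : Prop :=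
  grid ≠ [] ∧ ∀ row ∈ grid, (grid.headD []).length ≤ row.length
instance (grid : List (List Int)) : Decidable (Pre_transform grid) := by
  unfold Pre_transform; infer_instance

def pvWitness_transform : List (List Int) := [[0, 3], [0, 0]]

def Spec_transform (grid : List (List Int)) (out : List (List Int)) : Prop := out = transform_alt grid
instance (grid : List (List Int)) (out : List (List Int)) : Decidable (Spec_transform grid out) := by unfold Spec_transform; infer_instance

-- ===== CLAIM (what is proved, stated in full; the proofs are below) =====
def Claim_equal_transform : Prop := ∀ (grid : List (List Int)), Dom_transform grid → Pre_transform grid → Spec_transform grid (transform grid)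

-- ===== LEMMAS AND PROOFS =====

-- the cell value both programs read/write (0-defaulted; all proved accesses are in range)
def pvCell (g : List (List Int)) (k l : Nat) : Int := (g.getD k []).getD l 0

-- A's repaint loop, as a named function (definitionally the inner fold of `transform`)
def pvPaint (rows cols i j : Nat) (v : Int) (g : List (List Int)) : List (List Int) :=
  (List.range rows).foldl (fun g (k : Nat) =>
    (List.range cols).foldl (fun g (l : Nat) =>
      if ((k : Int) - (i : Int) + (l : Int) - (j : Int)) % 3 = 0 then
        g.modify k (fun row => row.set l v)
      else g) g) g

-- B's first-pass table and second (fill) pass, as named functions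
def pvVals (grid : List (List Int)) : List (Option Int) :=
  (List.range grid.length).foldl (fun vals i =>
    (List.range (grid.headD []).length).foldl (fun vals j =>
      if vals.getD ((i + j) % 3) none = none ∧ (grid.getD i []).getD j 0 ≠ 0 then
        vals.set ((i + j) % 3) (some ((grid.getD i []).getD j 0))
      else vals) vals) [none, none, none]

def pvFill (grid : List (List Int)) (vals : List (Option Int)) : List (List Int) :=
  (List.range grid.length).foldl (fun g (i : Nat) =>
    (List.range (grid.headD []).length).foldl (fun g (j : Nat) =>
      match vals.getD ((i + j) % 3) none with
      | some v => g.modify i (fun row => row.set j v)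
      | none => g) g) grid

lemma pv_getD_set {α : Type} (xs : List α) (i j : Nat) (v d : α) :
    (xs.set i v).getD j d = if j = i ∧ i < xs.length then v else xs.getD j d := by
  by_cases hij : j = i
  · subst hij
    by_cases hlen : j < xs.length
    · simp [List.getD, hlen]
    · simp [List.getD, hlen, List.getElem?_eq_none (by omega : xs.length ≤ j)]
  · simp [List.getD, hij, Ne.symm hij]

lemma pv_getD_modify (g : List (List Int)) (k k' : Nat) (f : List Int → List Int) :
    (g.modify k f).getD k' [] = if k' = k ∧ k < g.length then f (g.getD k []) else g.getD k' [] := by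
  by_cases h : k' = k
  · subst h
    by_cases hlen : k' < g.length
    · simp [List.getD, List.getElem?_modify, List.getElem?_eq_getElem hlen, hlen]
    · simp [List.getD, List.getElem?_modify, hlen,
        List.getElem?_eq_none (by omega : g.length ≤ k')]
  · simp [List.getD, List.getElem?_modify, h, Ne.symm h]

lemma pv_modify_id (g : List (List Int)) (k : Nat) : g.modify k (fun r => r) = g := by
  by_cases h : k < g.length
  · rw [List.modify_eq_set_getElem?]
    simp [List.getElem?_eq_getElem h, List.set_getElem_self h]
  · rw [List.modify_eq_set_getElem?]
    simp [List.getElem?_eq_none (by omega : g.length ≤ k)]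

lemma pv_modify_modify (g : List (List Int)) (k : Nat) (f h : List Int → List Int) :
    (g.modify k f).modify k h = g.modify k (fun r => h (f r)) := by
  apply List.ext_getElem?
  intro j
  by_cases h' : k = j
  · subst h'
    simp only [List.getElem?_modify, if_pos rfl]
    cases g[k]? <;> simp
  · simp [h']

lemma pv_foldl_modify (xs : List Nat) (k : Nat) (F : Nat → List Int → List Int) (g : List (List Int)) :
    xs.foldl (fun g x => g.modify k (F x)) g = g.modify k (fun r => xs.foldl (fun r x => F x r) r) := by
  induction xs generalizing g with
  | nil => exact (pv_modify_id g k).symm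
  | cons x xs ih =>
    rw [List.foldl_cons, ih, pv_modify_modify]
    rfl

lemma pv_rowFold_length (p : Nat → Prop) [DecidablePred p] (f : Nat → Int) (n : Nat) (row : List Int) :
    ((List.range n).foldl (fun r j => if p j then r.set j (f j) else r) row).length = row.length := by
  induction n with
  | zero => rfl
  | succ n ih =>
    rw [List.range_succ, List.foldl_append, List.foldl_cons, List.foldl_nil]
    split_ifs <;> simp [ih]

lemma pv_rowFold_getD (p : Nat → Prop) [DecidablePred p] (f : Nat → Int) (n : Nat) (row : List Int) (j : Nat) :
    ((List.range n).foldl (fun r j => if p j then r.set j (f j) else r) row).getD j 0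
      = if j < n ∧ j < row.length ∧ p j then f j else row.getD j 0 := by
  induction n with
  | zero => simp
  | succ n ih =>
    rw [List.range_succ, List.foldl_append, List.foldl_cons, List.foldl_nil]
    by_cases hpn : p n
    · rw [if_pos hpn, pv_getD_set, pv_rowFold_length]
      by_cases hj : j = n
      · subst hj
        by_cases hlen : j < row.length
        · rw [if_pos ⟨rfl, hlen⟩, if_pos ⟨by omega, hlen, hpn⟩]
        · rw [if_neg (by tauto), ih, if_neg (by tauto), if_neg (by tauto)]
      · have hiff : (j < n ∧ j < row.length ∧ p j) ↔ (j < n + 1 ∧ j < row.length ∧ p j) := by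
          constructor <;> (rintro ⟨h1, h2, h3⟩; exact ⟨by omega, h2, h3⟩)
        rw [if_neg (by tauto), ih, if_congr hiff rfl rfl]
    · have hiff : (j < n ∧ j < row.length ∧ p j) ↔ (j < n + 1 ∧ j < row.length ∧ p j) := by
        constructor
        · rintro ⟨h1, h2, h3⟩; exact ⟨by omega, h2, h3⟩
        · rintro ⟨h1, h2, h3⟩
          refine ⟨?_, h2, h3⟩
          by_cases hj : j = n
          · exact absurd (hj ▸ h3) hpn
          · omega
      rw [if_neg hpn, ih, if_congr hiff rfl rfl]

lemma pv_gridFold_length (F : Nat → List Int → List Int) (m : Nat) (g : List (List Int)) :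
    ((List.range m).foldl (fun g k => g.modify k (F k)) g).length = g.length := by
  induction m with
  | zero => rfl
  | succ m ih =>
    rw [List.range_succ, List.foldl_append, List.foldl_cons, List.foldl_nil]
    simp [ih]

lemma pv_gridFold_getD (F : Nat → List Int → List Int) (m : Nat) (g : List (List Int)) (k : Nat) :
    ((List.range m).foldl (fun g k => g.modify k (F k)) g).getD k []
      = if k < m ∧ k < g.length then F k (g.getD k []) else g.getD k [] := by
  induction m with
  | zero => simp
  | succ m ih =>
    rw [List.range_succ, List.foldl_append, List.foldl_cons, List.foldl_nil,
      pv_getD_modify, pv_gridFold_length]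
    by_cases hk : k = m
    · subst hk
      by_cases hlen : k < g.length
      · rw [if_pos ⟨rfl, hlen⟩, ih, if_neg (by omega), if_pos ⟨by omega, hlen⟩]
      · rw [if_neg (by tauto), ih, if_neg (by tauto), if_neg (by tauto)]
    · have hiff : (k < m ∧ k < g.length) ↔ (k < m + 1 ∧ k < g.length) := by
        constructor <;> (rintro ⟨h1, h2⟩; exact ⟨by omega, h2⟩)
      rw [if_neg (by tauto), ih, if_congr hiff rfl rfl]

-- A's diagonal test is exactly equality of (i+j) mod 3 residue classes
lemma pv_cond_iff (i j k l : Nat) :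
    ((((k : Int) - (i : Int) + (l : Int) - (j : Int)) % 3 = 0)) ↔ ((k + l) % 3 = (i + j) % 3) := by
  omega

lemma pvPaint_eq (rows cols i j : Nat) (v : Int) (g : List (List Int)) :
    pvPaint rows cols i j v g
      = (List.range rows).foldl (fun g k => g.modify k (fun r =>
          (List.range cols).foldl (fun r l =>
            if (k + l) % 3 = (i + j) % 3 then r.set l v else r) r)) g := by
  unfold pvPaint
  congr 1
  funext g k
  have hfun : (fun (g : List (List Int)) (l : Nat) =>
      if ((k : Int) - (i : Int) + (l : Int) - (j : Int)) % 3 = 0 then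
        g.modify k (fun row => row.set l v) else g)
    = (fun (g : List (List Int)) (l : Nat) =>
        g.modify k (fun r => if (k + l) % 3 = (i + j) % 3 then r.set l v else r)) := by
    funext g l
    by_cases h : (k + l) % 3 = (i + j) % 3
    · rw [if_pos ((pv_cond_iff i j k l).mpr h)]
      congr 1
      funext r
      rw [if_pos h]
    · rw [if_neg (fun hc => h ((pv_cond_iff i j k l).mp hc))]
      conv_rhs => rw [show (fun r : List Int => if (k + l) % 3 = (i + j) % 3 then r.set l v else r) = fun r => r from funext fun r => if_neg h]
      rw [pv_modify_id]
  rw [hfun, pv_foldl_modify]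

lemma pvPaint_length (rows cols i j : Nat) (v : Int) (g : List (List Int)) :
    (pvPaint rows cols i j v g).length = g.length := by
  rw [pvPaint_eq]
  exact pv_gridFold_length _ _ _

lemma pvPaint_rowlen (rows cols i j : Nat) (v : Int) (g : List (List Int)) (k : Nat) :
    ((pvPaint rows cols i j v g).getD k []).length = (g.getD k []).length := by
  rw [pvPaint_eq, pv_gridFold_getD]
  split_ifs with h
  · exact pv_rowFold_length _ _ _ _
  · rfl

lemma pvPaint_cell (rows cols i j : Nat) (v : Int) (g : List (List Int)) (k l : Nat) :
    pvCell (pvPaint rows cols i j v g) k l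
      = if k < rows ∧ k < g.length ∧ l < cols ∧ l < (g.getD k []).length ∧ (k + l) % 3 = (i + j) % 3
        then v else pvCell g k l := by
  rw [pvCell, pvPaint_eq, pv_gridFold_getD]
  by_cases hk : k < rows ∧ k < g.length
  · rw [if_pos hk, pv_rowFold_getD]
    by_cases hl : l < cols ∧ l < (g.getD k []).length ∧ (k + l) % 3 = (i + j) % 3
    · rw [if_pos hl, if_pos ⟨hk.1, hk.2, hl⟩]
    · rw [if_neg hl, if_neg (by tauto)]
      rfl
  · rw [if_neg hk, if_neg (by tauto)]
    rfl

lemma pvFill_eq (grid : List (List Int)) (vals : List (Option Int)) :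
    pvFill grid vals
      = (List.range grid.length).foldl (fun g k => g.modify k (fun r =>
          (List.range (grid.headD []).length).foldl (fun r l =>
            if (vals.getD ((k + l) % 3) none).isSome = true then
              r.set l ((vals.getD ((k + l) % 3) none).getD 0)
            else r) r)) grid := by
  unfold pvFill
  congr 1
  funext g k
  have hfun : (fun (g : List (List Int)) (j : Nat) =>
      match vals.getD ((k + j) % 3) none with
      | some v => g.modify k (fun row => row.set j v)
      | none => g)
    = (fun (g : List (List Int)) (l : Nat) =>
        g.modify k (fun r =>
          if (vals.getD ((k + l) % 3) none).isSome = true then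
            r.set l ((vals.getD ((k + l) % 3) none).getD 0)
          else r)) := by
    funext g l
    cases hv : vals.getD ((k + l) % 3) none with
    | none =>
      simp only [Option.isSome_none, Bool.false_eq_true, if_false]
      exact (pv_modify_id g k).symm
    | some w =>
      simp only [Option.isSome_some, Option.getD_some, if_true]
  rw [hfun, pv_foldl_modify]

lemma pvFill_length (grid : List (List Int)) (vals : List (Option Int)) :
    (pvFill grid vals).length = grid.length := by
  rw [pvFill_eq]; exact pv_gridFold_length _ _ _

lemma pvFill_rowlen (grid : List (List Int)) (vals : List (Option Int)) (k : Nat) :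
    ((pvFill grid vals).getD k []).length = (grid.getD k []).length := by
  rw [pvFill_eq, pv_gridFold_getD]
  split_ifs with h
  · exact pv_rowFold_length _ _ _ _
  · rfl

lemma pvFill_cell (grid : List (List Int)) (vals : List (Option Int)) (k l : Nat) :
    pvCell (pvFill grid vals) k l
      = if k < grid.length ∧ l < (grid.headD []).length ∧ l < (grid.getD k []).length
            ∧ (vals.getD ((k + l) % 3) none).isSome = true
        then (vals.getD ((k + l) % 3) none).getD 0 else pvCell grid k l := by
  rw [pvCell, pvFill_eq, pv_gridFold_getD]
  by_cases hk : k < grid.length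
  · rw [if_pos ⟨hk, hk⟩, pv_rowFold_getD]
    by_cases hl : l < (grid.headD []).length ∧ l < (grid.getD k []).length
        ∧ (vals.getD ((k + l) % 3) none).isSome = true
    · rw [if_pos ⟨hl.1, hl.2.1, hl.2.2⟩, if_pos ⟨hk, hl⟩]
    · rw [if_neg (by tauto), if_neg (by tauto)]
      rfl
  · rw [if_neg (by tauto), if_neg (by tauto)]
    rfl

-- the invariant tying A's evolving grid to B's table over the same scan prefix: painted
-- classes carry their recorded value everywhere in range, everything else is the original
-- grid, and the table only records nonzero values
def pvInv (grid : List (List Int)) (vals : List (Option Int)) (g : List (List Int)) : Prop :=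
  g.length = grid.length ∧
  (∀ k, (g.getD k []).length = (grid.getD k []).length) ∧
  (∀ k l, k < grid.length → l < (grid.headD []).length →
     pvCell g k l = (vals.getD ((k + l) % 3) none).getD (pvCell grid k l)) ∧
  (∀ k l, ¬ (k < grid.length ∧ l < (grid.headD []).length) → pvCell g k l = pvCell grid k l) ∧
  (∀ c v, vals.getD c none = some v → v ≠ 0) ∧
  vals.length = 3

lemma pv_rowlen_ge (grid : List (List Int))
    (Hcols : ∀ row ∈ grid, (grid.headD []).length ≤ row.length)
    (k : Nat) (hk : k < grid.length) :
    (grid.headD []).length ≤ (grid.getD k []).length := by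
  rw [List.getD_eq_getElem _ _ hk]
  exact Hcols _ (List.getElem_mem hk)

-- one step of A's scan preserves the invariant, advancing B's table by one scan step
lemma pv_step (grid : List (List Int)) (vals : List (Option Int)) (g : List (List Int))
    (Hcols : ∀ row ∈ grid, (grid.headD []).length ≤ row.length)
    (hInv : pvInv grid vals g) (i j : Nat) (hi : i < grid.length) (hj : j < (grid.headD []).length) :
    pvInv grid
      (if vals.getD ((i + j) % 3) none = none ∧ (grid.getD i []).getD j 0 ≠ 0 then
          vals.set ((i + j) % 3) (some ((grid.getD i []).getD j 0))
        else vals)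
      (let v := (g.getD i []).getD j 0
       if v ≠ 0 then pvPaint grid.length (grid.headD []).length i j v g else g) := by
  obtain ⟨h1, h2, h3, h4, h5, h6⟩ := hInv
  have hcv : pvCell g i j = (vals.getD ((i + j) % 3) none).getD (pvCell grid i j) := h3 i j hi hj
  show pvInv grid _
      (if (g.getD i []).getD j 0 ≠ 0 then
        pvPaint grid.length (grid.headD []).length i j ((g.getD i []).getD j 0) g else g)
  cases hval : vals.getD ((i + j) % 3) none with
  | some w =>
    have hw0 : w ≠ 0 := h5 _ w hval
    have hgv : (g.getD i []).getD j 0 = w := by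
      rw [show (g.getD i []).getD j 0 = pvCell g i j from rfl, hcv, hval, Option.getD_some]
    rw [if_neg (by simp), hgv, if_pos hw0]
    refine ⟨by rw [pvPaint_length]; exact h1, fun k => by rw [pvPaint_rowlen]; exact h2 k, ?_, ?_, h5, h6⟩
    · intro k l hk hl
      rw [show pvCell (pvPaint grid.length (grid.headD []).length i j w g) k l
            = _ from pvPaint_cell _ _ _ _ _ _ _ _]
      by_cases hcl : (k + l) % 3 = (i + j) % 3
      · have hklen : l < (g.getD k []).length := by
          rw [h2 k]; exact lt_of_lt_of_le hl (pv_rowlen_ge grid Hcols k hk)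
        rw [if_pos ⟨hk, by omega, hl, hklen, hcl⟩, hcl, hval, Option.getD_some]
      · rw [if_neg (by tauto)]
        exact h3 k l hk hl
    · intro k l hnk
      rw [show pvCell (pvPaint grid.length (grid.headD []).length i j w g) k l
            = _ from pvPaint_cell _ _ _ _ _ _ _ _, if_neg (by tauto)]
      exact h4 k l hnk
  | none =>
    have hgv : (g.getD i []).getD j 0 = pvCell grid i j := by
      rw [show (g.getD i []).getD j 0 = pvCell g i j from rfl, hcv, hval, Option.getD_none]
    by_cases h0 : pvCell grid i j = 0
    · rw [if_neg (fun h => h.2 h0), hgv, if_neg (by simpa using h0)]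
      exact ⟨h1, h2, h3, h4, h5, h6⟩
    · rw [if_pos ⟨rfl, h0⟩, hgv, if_pos h0]
      have hclt : (i + j) % 3 < vals.length := by rw [h6]; omega
      refine ⟨by rw [pvPaint_length]; exact h1, fun k => by rw [pvPaint_rowlen]; exact h2 k,
        ?_, ?_, ?_, by rw [List.length_set]; exact h6⟩
      · intro k l hk hl
        rw [show pvCell (pvPaint grid.length (grid.headD []).length i j (pvCell grid i j) g) k l
              = _ from pvPaint_cell _ _ _ _ _ _ _ _, pv_getD_set]
        by_cases hcl : (k + l) % 3 = (i + j) % 3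
        · have hklen : l < (g.getD k []).length := by
            rw [h2 k]; exact lt_of_lt_of_le hl (pv_rowlen_ge grid Hcols k hk)
          rw [if_pos ⟨hk, by omega, hl, hklen, hcl⟩, if_pos ⟨hcl, hclt⟩, Option.getD_some]
          rfl
        · rw [if_neg (by tauto), if_neg (by tauto)]
          exact h3 k l hk hl
      · intro k l hnk
        rw [show pvCell (pvPaint grid.length (grid.headD []).length i j (pvCell grid i j) g) k l
              = _ from pvPaint_cell _ _ _ _ _ _ _ _, if_neg (by tauto)]
        exact h4 k l hnk
      · intro c' w hw
        rw [pv_getD_set] at hw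
        by_cases hcc : c' = (i + j) % 3 ∧ (i + j) % 3 < vals.length
        · rw [if_pos hcc] at hw
          cases hw
          exact h0
        · rw [if_neg hcc] at hw
          exact h5 c' w hw

-- fold two synchronized loops while preserving a binary relation
lemma pv_fold_pair {σ τ : Type} (P : σ → τ → Prop) (f : σ → Nat → σ) (h : τ → Nat → τ)
    (xs : List Nat) (step : ∀ s t x, x ∈ xs → P s t → P (f s x) (h t x)) :
    ∀ s t, P s t → P (xs.foldl f s) (xs.foldl h t) := by
  induction xs with
  | nil => intro s t hst; exact hst
  | cons x xs ih =>
    intro s t hst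
    exact ih (fun s t y hy => step s t y (List.mem_cons_of_mem _ hy))
      _ _ (step s t x List.mem_cons_self hst)

lemma pv_none3 (c : Nat) : (([none, none, none] : List (Option Int)).getD c none) = none := by
  match c with
  | 0 | 1 | 2 => rfl
  | (n + 3) => rfl

lemma pv_transform_eq (grid : List (List Int)) :
    transform grid
      = (List.range grid.length).foldl (fun g i =>
          (List.range (grid.headD []).length).foldl (fun g j =>
            let v := (g.getD i []).getD j 0
            if v ≠ 0 then pvPaint grid.length (grid.headD []).length i j v g else g) g) grid := rfl

lemma pv_alt_eq (grid : List (List Int)) :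
    transform_alt grid = pvFill grid (pvVals grid) := rfl

-- the invariant at the end of A's scan, against B's completed table
lemma pv_main (grid : List (List Int))
    (Hcols : ∀ row ∈ grid, (grid.headD []).length ≤ row.length) :
    pvInv grid (pvVals grid) (transform grid) := by
  rw [pv_transform_eq]
  unfold pvVals
  refine pv_fold_pair (pvInv grid) _ _ _ ?_ _ _ ?_
  · intro vals g i hmem hP
    refine pv_fold_pair (pvInv grid) _ _ _ ?_ _ _ hP
    intro vals g j hjmem hP'
    exact pv_step grid vals g Hcols hP' i j (List.mem_range.mp hmem) (List.mem_range.mp hjmem)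
  · refine ⟨rfl, fun k => rfl, ?_, fun k l _ => rfl, ?_, rfl⟩
    · intro k l _ _
      rw [pv_none3 ((k + l) % 3), Option.getD_none]
    · intro c v hcv
      rw [pv_none3 c] at hcv
      exact absurd hcv (by simp)

-- ===== VERDICT (by name: the statement is the Claim_ definition above) =====
theorem transform_spec : Claim_equal_transform := by
  intro grid _ hPre
  obtain ⟨-, Hcols⟩ := hPre
  obtain ⟨h1, h2, h3, h4, h5, h6⟩ := pv_main grid Hcols
  unfold Spec_transform
  rw [pv_alt_eq]
  apply List.ext_getElem
  · rw [h1, pvFill_length]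
  · intro k hk1 hk2
    have hkg : k < grid.length := by rw [← h1]; exact hk1
    apply List.ext_getElem
    · have e1 : (transform grid)[k] = (transform grid).getD k [] :=
        (List.getD_eq_getElem _ _ hk1).symm
      have e2 : (pvFill grid (pvVals grid))[k] = (pvFill grid (pvVals grid)).getD k [] :=
        (List.getD_eq_getElem _ _ hk2).symm
      rw [e1, e2, h2 k, pvFill_rowlen]
    · intro l hl1 hl2
      have hlg : l < (grid.getD k []).length := by
        have e1 : (transform grid)[k] = (transform grid).getD k [] :=
          (List.getD_eq_getElem _ _ hk1).symm
        rw [e1, h2 k] at hl1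
        exact hl1
      have eA : (transform grid)[k][l] = pvCell (transform grid) k l := by
        rw [pvCell, List.getD_eq_getElem _ _ hk1, List.getD_eq_getElem]
      have eB : (pvFill grid (pvVals grid))[k][l] = pvCell (pvFill grid (pvVals grid)) k l := by
        rw [pvCell, List.getD_eq_getElem _ _ hk2, List.getD_eq_getElem]
      rw [eA, eB, pvFill_cell]
      by_cases hl : l < (grid.headD []).length
      · rw [h3 k l hkg hl]
        cases hv : (pvVals grid).getD ((k + l) % 3) none with
        | none => rw [if_neg (by simp), Option.getD_none, pvCell]
        | some w => rw [if_pos ⟨hkg, hl, hlg, by simp⟩, Option.getD_some, Option.getD_some]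
      · rw [h4 k l (by tauto), if_neg (by tauto), pvCell]
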